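-- pv_equiv track=rewrite | github.com/julia0926/TIL_Algo | 이코테/test.py | solution
-- ===== SOURCE A (Python) =====
-- def solution(letters):
--     upper = {}
--     lower = {}
--     for i, char in enumerate(letters):
--         if char.islower():
--             lower[char] = i
--         elif char.isupper():
--             lower_char = char.lower()
--             if lower_char not in upper:
--                 upper[lower_char] = i
--
--         # elif char.isupper():
--         #     lower_char = char.lower()
--         #     if lower_char not in upper:
--         #         upper[lower_char] = i
--     count = 0
--     for char in lower:
--         if char in upper and lower[char] < upper[char]:
--             count += 1
--     return count
-- ===== SOURCE B (Python) =====
-- def solution(letters):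
--     # Online single pass: no index dictionaries, no second key-loop.
--     count = 0
--     upper_seen = set()   # letters whose uppercase form has appeared
--     lower_seen = set()   # letters seen lowercase before their first uppercase
--     counted = set()      # letters currently counted
--     for char in letters:
--         if char.islower():
--             if char in upper_seen:
--                 if char in counted:
--                     counted.discard(char)
--                     count -= 1
--             else:
--                 lower_seen.add(char)
--         elif char.isupper():
--             lc = char.lower()
--             if lc not in upper_seen:
--                 upper_seen.add(lc)
--                 if lc in lower_seen:
--                     counted.add(lc)
--                     count += 1
--     return count
-- ===== Notes on version B (the rewrite author's own statement) =====
-- stated objective: alternative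
-- what changed: A builds two index dictionaries (last-lowercase and first-uppercase positions) and then runs a second key-loop comparing indices; B is an online single pass over the characters maintaining a running count and three sets (upper_seen, lower_seen, counted), with no indices stored and no second pass.
import Mathlib
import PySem

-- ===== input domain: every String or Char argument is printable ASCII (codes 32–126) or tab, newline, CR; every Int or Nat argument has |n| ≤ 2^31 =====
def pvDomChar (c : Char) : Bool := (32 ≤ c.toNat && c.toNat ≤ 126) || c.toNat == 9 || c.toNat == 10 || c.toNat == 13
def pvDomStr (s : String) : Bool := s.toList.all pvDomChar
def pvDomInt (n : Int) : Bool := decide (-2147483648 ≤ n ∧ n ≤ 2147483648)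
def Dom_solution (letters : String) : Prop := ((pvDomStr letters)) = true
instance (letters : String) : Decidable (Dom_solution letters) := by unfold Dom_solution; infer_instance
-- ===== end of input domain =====

-- B replaces A's two index dictionaries and second key-loop by an online single pass
-- with a running count and three sets (alternative decomposition, same O(n) cost).

-- ===== PORT A =====
-- one iteration of A's first (dict-building) loop over enumerate(letters)
def solA_step (st : PySem.Dict Char Int × PySem.Dict Char Int) (p : Int × Char) :
    PySem.Dict Char Int × PySem.Dict Char Int :=
  if PySem.Chars.islower p.2 then
    (st.1, st.2.insert p.2 p.1)
  else if PySem.Chars.isupper p.2 then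
    let lower_char := PySem.Chars.lowerChar p.2
    if st.1.contains lower_char then st
    else (st.1.insert lower_char p.1, st.2)
  else st

def solution (letters : String) : Int :=
  let st := (PySem.List.enumerate letters.toList 0).foldl solA_step
              (PySem.Dict.empty, PySem.Dict.empty)
  -- second loop: for char in lower: if char in upper and lower[char] < upper[char]: count += 1
  st.2.keys.foldl
    (fun count c =>
      if st.1.contains c && decide (st.2.getD c 0 < st.1.getD c 0) then count + 1 else count)
    0

-- ===== PORT B =====
-- state: (count, upper_seen, lower_seen, counted); one iteration of B's single loop
def solB_step (st : Int × PySem.Set Char × PySem.Set Char × PySem.Set Char) (c : Char) :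
    Int × PySem.Set Char × PySem.Set Char × PySem.Set Char :=
  if PySem.Chars.islower c then
    if PySem.Set.contains st.2.1 c then
      if PySem.Set.contains st.2.2.2 c then
        (st.1 - 1, st.2.1, st.2.2.1, PySem.Set.discard st.2.2.2 c)
      else st
    else (st.1, st.2.1, PySem.Set.add st.2.2.1 c, st.2.2.2)
  else if PySem.Chars.isupper c then
    let lc := PySem.Chars.lowerChar c
    if PySem.Set.contains st.2.1 lc then st
    else if PySem.Set.contains st.2.2.1 lc then
      (st.1 + 1, PySem.Set.add st.2.1 lc, st.2.2.1, PySem.Set.add st.2.2.2 lc)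
    else (st.1, PySem.Set.add st.2.1 lc, st.2.2.1, st.2.2.2)
  else st

def solution_alt (letters : String) : Int :=
  (letters.toList.foldl solB_step
    (0, PySem.Set.empty, PySem.Set.empty, PySem.Set.empty)).1

-- ===== PRECONDITION & SPEC =====
def Spec_solution (letters : String) (out : Int) : Prop := out = solution_alt letters
instance (letters : String) (out : Int) : Decidable (Spec_solution letters out) := by unfold Spec_solution; infer_instance

-- ===== CLAIM (what is proved, stated in full; the proofs are below) =====
def Claim_equal_solution : Prop := ∀ (letters : String), Dom_solution letters → Spec_solution letters (solution letters)

-- ===== LEMMAS AND PROOFS =====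

-- invariant linking A's dict pair (U = upper, L = lower) after a prefix of the input with
-- B's count and set triple (us = upper_seen, ls = lower_seen, cs = counted) after the same
-- prefix; i is the number of characters processed so far.
def SolInv (i : Int) (U L : PySem.Dict Char Int)
    (us ls cs : PySem.Set Char) : Prop :=
  (∀ c, c ∈ us ↔ (U.get? c).isSome) ∧
  cs.Nodup ∧
  (∀ c, c ∈ cs ↔ ((U.get? c).isSome ∧ (L.get? c).isSome ∧ L.getD c 0 < U.getD c 0)) ∧
  (∀ c, U.get? c = none → (c ∈ ls ↔ (L.get? c).isSome)) ∧
  (∀ c v, L.get? c = some v → 0 ≤ v ∧ v < i) ∧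
  (∀ c v, U.get? c = some v → 0 ≤ v ∧ v < i) ∧
  L.keys.Nodup


theorem solInv_step (i : Int) (hi : 0 ≤ i) (c : Char) (U L : PySem.Dict Char Int)
    (us ls cs : PySem.Set Char) (h : SolInv i U L us ls cs) (n : Int)
    (hn : n = (cs.length : Int)) :
    SolInv (i + 1) (solA_step (U, L) (i, c)).1 (solA_step (U, L) (i, c)).2
      (solB_step (n, us, ls, cs) c).2.1 (solB_step (n, us, ls, cs) c).2.2.1
      (solB_step (n, us, ls, cs) c).2.2.2 ∧
    (solB_step (n, us, ls, cs) c).1 = (((solB_step (n, us, ls, cs) c).2.2.2).length : Int) := by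
  obtain ⟨hus, hcnd, hcs, hls, hLv, hUv, hLnd⟩ := h
  by_cases hl : PySem.Chars.islower c = true
  · -- lowercase branch
    by_cases hm : c ∈ us
    · have husb : PySem.Set.contains us c = true := (PySem.Set.contains_iff us c).mpr hm
      have hUc : (U.get? c).isSome := (hus c).mp hm
      obtain ⟨v, hv⟩ := Option.isSome_iff_exists.mp hUc
      by_cases hcm : c ∈ cs
      · -- lowercase again after first uppercase while counted: B retracts, A moves lower[c] up
        have hcsb : PySem.Set.contains cs c = true := (PySem.Set.contains_iff cs c).mpr hcm
        simp only [solA_step, solB_step, hl, husb, hcsb, if_true]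
        refine ⟨⟨hus, PySem.Set.nodup_discard cs c hcnd, ?_, ?_, ?_, ?_,
            PySem.Dict.nodup_keys_insert L c i hLnd⟩, ?_⟩
        · intro a
          rw [PySem.Set.mem_discard]
          by_cases hcc : a = c
          · subst hcc
            rw [PySem.Dict.get?_insert_self, PySem.Dict.getD_insert_self]
            constructor
            · rintro ⟨_, hne⟩; exact absurd rfl hne
            · rintro ⟨_, _, hlt⟩
              rw [PySem.Dict.getD_of_get?_eq_some U 0 hv] at hlt
              exact absurd hlt (by have := (hUv a v hv).2; omega)
          · rw [PySem.Dict.get?_insert_of_ne _ _ hcc, PySem.Dict.getD_insert_of_ne _ _ _ hcc,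
              hcs a]
            tauto
        · intro a hU'
          have hcc : a ≠ c := by rintro rfl; rw [hv] at hU'; cases hU'
          rw [PySem.Dict.get?_insert_of_ne _ _ hcc]
          exact hls a hU'
        · intro a w hw
          by_cases hcc : a = c
          · subst hcc; rw [PySem.Dict.get?_insert_self] at hw; cases hw; omega
          · rw [PySem.Dict.get?_insert_of_ne _ _ hcc] at hw; have := hLv a w hw; omega
        · intro a w hw; have := hUv a w hw; omega
        · have e : PySem.Set.discard cs c = cs.erase c := by
            rw [List.Nodup.erase_eq_filter hcnd]
            simp [PySem.Set.discard]
            rfl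
          rw [e, List.length_erase_of_mem hcm]
          have := List.length_pos_of_mem hcm
          omega
      · -- lowercase after first uppercase, not counted: B no-op, A moves lower[c] up
        have hcsb : PySem.Set.contains cs c = false := by
          simp [hcm]
        simp only [solA_step, solB_step, hl, husb, hcsb, if_true, Bool.false_eq_true, if_false]
        refine ⟨⟨hus, hcnd, ?_, ?_, ?_, ?_, PySem.Dict.nodup_keys_insert L c i hLnd⟩, hn⟩
        · intro a
          by_cases hcc : a = c
          · subst hcc
            rw [PySem.Dict.get?_insert_self, PySem.Dict.getD_insert_self]
            constructor
            · intro hmm; exact absurd hmm hcm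
            · rintro ⟨_, _, hlt⟩
              rw [PySem.Dict.getD_of_get?_eq_some U 0 hv] at hlt
              exact absurd hlt (by have := (hUv a v hv).2; omega)
          · rw [PySem.Dict.get?_insert_of_ne _ _ hcc, PySem.Dict.getD_insert_of_ne _ _ _ hcc]
            exact hcs a
        · intro a hU'
          have hcc : a ≠ c := by rintro rfl; rw [hv] at hU'; cases hU'
          rw [PySem.Dict.get?_insert_of_ne _ _ hcc]
          exact hls a hU'
        · intro a w hw
          by_cases hcc : a = c
          · subst hcc; rw [PySem.Dict.get?_insert_self] at hw; cases hw; omega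
          · rw [PySem.Dict.get?_insert_of_ne _ _ hcc] at hw; have := hLv a w hw; omega
        · intro a w hw; have := hUv a w hw; omega
    · -- lowercase before any uppercase of c: B records it in lower_seen
      have husb : PySem.Set.contains us c = false := by
        simp [hm]
      have hUc : U.get? c = none := by
        cases hU : U.get? c with
        | none => rfl
        | some w => exact absurd ((hus c).mpr (by rw [hU]; rfl)) hm
      simp only [solA_step, solB_step, hl, husb, if_true, Bool.false_eq_true, if_false]
      refine ⟨⟨hus, hcnd, ?_, ?_, ?_, ?_, PySem.Dict.nodup_keys_insert L c i hLnd⟩, hn⟩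
      · intro a
        by_cases hcc : a = c
        · subst hcc
          rw [PySem.Dict.get?_insert_self, hcs a, hUc]
          simp
        · rw [PySem.Dict.get?_insert_of_ne _ _ hcc, PySem.Dict.getD_insert_of_ne _ _ _ hcc]
          exact hcs a
      · intro a hU'
        rw [PySem.Set.mem_add]
        by_cases hcc : a = c
        · subst hcc
          rw [PySem.Dict.get?_insert_self]
          simp
        · rw [PySem.Dict.get?_insert_of_ne _ _ hcc, hls a hU']
          simp [hcc]
      · intro a w hw
        by_cases hcc : a = c
        · subst hcc; rw [PySem.Dict.get?_insert_self] at hw; cases hw; omega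
        · rw [PySem.Dict.get?_insert_of_ne _ _ hcc] at hw; have := hLv a w hw; omega
      · intro a w hw; have := hUv a w hw; omega
  · by_cases hu : PySem.Chars.isupper c = true
    · -- uppercase branch; lc is the lowercase form
      by_cases hm : PySem.Chars.lowerChar c ∈ us
      · -- uppercase already seen: both sides keep their state
        have husb : PySem.Set.contains us (PySem.Chars.lowerChar c) = true :=
          (PySem.Set.contains_iff us (PySem.Chars.lowerChar c)).mpr hm
        have hUb : U.contains (PySem.Chars.lowerChar c) = true := by
          rw [PySem.Dict.contains_eq_isSome_get?]
          exact (hus (PySem.Chars.lowerChar c)).mp hm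
        simp only [solA_step, solB_step, hl, hu, husb, hUb, Bool.false_eq_true, if_false, if_true]
        refine ⟨⟨hus, hcnd, hcs, hls, ?_, ?_, hLnd⟩, hn⟩
        · intro a w hw; have := hLv a w hw; omega
        · intro a w hw; have := hUv a w hw; omega
      · have husb : PySem.Set.contains us (PySem.Chars.lowerChar c) = false := by
          simp [hm]
        have hUc : U.get? (PySem.Chars.lowerChar c) = none := by
          cases hU : U.get? (PySem.Chars.lowerChar c) with
          | none => rfl
          | some w => exact absurd ((hus (PySem.Chars.lowerChar c)).mpr (by rw [hU]; rfl)) hm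
        have hUb : U.contains (PySem.Chars.lowerChar c) = false := by
          rw [PySem.Dict.contains_eq_isSome_get?, hUc]; rfl
        have hlcnots : PySem.Chars.lowerChar c ∉ cs := by
          intro hmm
          have := ((hcs (PySem.Chars.lowerChar c)).mp hmm).1
          rw [hUc] at this
          cases this
        by_cases hlsm : PySem.Chars.lowerChar c ∈ ls
        · -- first uppercase after a lowercase: qualifies, B counts it
          have hlsb : PySem.Set.contains ls (PySem.Chars.lowerChar c) = true :=
            (PySem.Set.contains_iff ls (PySem.Chars.lowerChar c)).mpr hlsm
          have hLc : (L.get? (PySem.Chars.lowerChar c)).isSome :=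
            (hls (PySem.Chars.lowerChar c) hUc).mp hlsm
          obtain ⟨w, hw⟩ := Option.isSome_iff_exists.mp hLc
          simp only [solA_step, solB_step, hl, hu, husb, hlsb, hUb, Bool.false_eq_true,
            if_false, if_true]
          refine ⟨⟨?_, PySem.Set.nodup_add cs (PySem.Chars.lowerChar c) hcnd, ?_, ?_, ?_, ?_,
              hLnd⟩, ?_⟩
          · intro a
            rw [PySem.Set.mem_add]
            by_cases hcc : a = PySem.Chars.lowerChar c
            · subst hcc
              rw [PySem.Dict.get?_insert_self]
              simp
            · rw [PySem.Dict.get?_insert_of_ne _ _ hcc, hus a]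
              simp [hcc]
          · intro a
            rw [PySem.Set.mem_add]
            by_cases hcc : a = PySem.Chars.lowerChar c
            · subst hcc
              rw [PySem.Dict.get?_insert_self, PySem.Dict.getD_insert_self,
                PySem.Dict.getD_of_get?_eq_some L 0 hw]
              have := (hLv (PySem.Chars.lowerChar c) w hw).2
              simp [hw]
              omega
            · rw [PySem.Dict.get?_insert_of_ne _ _ hcc, PySem.Dict.getD_insert_of_ne _ _ _ hcc,
                hcs a]
              simp [hcc]
          · intro a hU'
            by_cases hcc : a = PySem.Chars.lowerChar c
            · subst hcc; rw [PySem.Dict.get?_insert_self] at hU'; cases hU'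
            · rw [PySem.Dict.get?_insert_of_ne _ _ hcc] at hU'
              exact hls a hU'
          · intro a w' hw'; have := hLv a w' hw'; omega
          · intro a w' hw'
            by_cases hcc : a = PySem.Chars.lowerChar c
            · subst hcc; rw [PySem.Dict.get?_insert_self] at hw'; cases hw'; omega
            · rw [PySem.Dict.get?_insert_of_ne _ _ hcc] at hw'; have := hUv a w' hw'; omega
          · rw [PySem.Set.add_of_not_mem hlcnots]
            simp [hn]
        · -- first uppercase with no lowercase before it
          have hlsb : PySem.Set.contains ls (PySem.Chars.lowerChar c) = false := by
            simp [hlsm]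
          have hLc : L.get? (PySem.Chars.lowerChar c) = none := by
            cases hL : L.get? (PySem.Chars.lowerChar c) with
            | none => rfl
            | some w =>
              exact absurd ((hls (PySem.Chars.lowerChar c) hUc).mpr (by rw [hL]; rfl)) hlsm
          simp only [solA_step, solB_step, hl, hu, husb, hlsb, hUb, Bool.false_eq_true,
            if_false, if_true]
          refine ⟨⟨?_, hcnd, ?_, ?_, ?_, ?_, hLnd⟩, hn⟩
          · intro a
            rw [PySem.Set.mem_add]
            by_cases hcc : a = PySem.Chars.lowerChar c
            · subst hcc
              rw [PySem.Dict.get?_insert_self]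
              simp
            · rw [PySem.Dict.get?_insert_of_ne _ _ hcc, hus a]
              simp [hcc]
          · intro a
            by_cases hcc : a = PySem.Chars.lowerChar c
            · subst hcc
              rw [PySem.Dict.get?_insert_self, hcs (PySem.Chars.lowerChar c), hUc, hLc]
              simp
            · rw [PySem.Dict.get?_insert_of_ne _ _ hcc, PySem.Dict.getD_insert_of_ne _ _ _ hcc]
              exact hcs a
          · intro a hU'
            by_cases hcc : a = PySem.Chars.lowerChar c
            · subst hcc; rw [PySem.Dict.get?_insert_self] at hU'; cases hU'
            · rw [PySem.Dict.get?_insert_of_ne _ _ hcc] at hU'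
              exact hls a hU'
          · intro a w' hw'; have := hLv a w' hw'; omega
          · intro a w' hw'
            by_cases hcc : a = PySem.Chars.lowerChar c
            · subst hcc; rw [PySem.Dict.get?_insert_self] at hw'; cases hw'; omega
            · rw [PySem.Dict.get?_insert_of_ne _ _ hcc] at hw'; have := hUv a w' hw'; omega
    · -- neither lowercase nor uppercase: both sides keep their state
      simp only [solA_step, solB_step, hl, hu, Bool.false_eq_true, if_false]
      refine ⟨⟨hus, hcnd, hcs, hls, ?_, ?_, hLnd⟩, hn⟩
      · intro a w hw; have := hLv a w hw; omega
      · intro a w hw; have := hUv a w hw; omega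

theorem solInv_loop (chars : List Char) : ∀ (i : Int), 0 ≤ i →
    ∀ (U L : PySem.Dict Char Int) (n : Int) (us ls cs : PySem.Set Char),
    SolInv i U L us ls cs → n = (cs.length : Int) →
    SolInv (i + chars.length)
      ((PySem.List.enumerate chars i).foldl solA_step (U, L)).1
      ((PySem.List.enumerate chars i).foldl solA_step (U, L)).2
      (chars.foldl solB_step (n, us, ls, cs)).2.1
      (chars.foldl solB_step (n, us, ls, cs)).2.2.1
      (chars.foldl solB_step (n, us, ls, cs)).2.2.2 ∧
    (chars.foldl solB_step (n, us, ls, cs)).1 =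
      (((chars.foldl solB_step (n, us, ls, cs)).2.2.2).length : Int) := by
  induction chars with
  | nil =>
    intro i hi U L n us ls cs h hn
    simpa [PySem.List.enumerate_nil] using And.intro h hn
  | cons c rest ih =>
    intro i hi U L n us ls cs h hn
    rw [PySem.List.enumerate_cons]
    simp only [List.foldl_cons]
    obtain ⟨h1, h2⟩ := solInv_step i hi c U L us ls cs h n hn
    have := ih (i + 1) (by omega) (solA_step (U, L) (i, c)).1 (solA_step (U, L) (i, c)).2
      (solB_step (n, us, ls, cs) c).1 (solB_step (n, us, ls, cs) c).2.1
      (solB_step (n, us, ls, cs) c).2.2.1 (solB_step (n, us, ls, cs) c).2.2.2 h1 h2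
    have harith : i + 1 + (rest.length : Int) = i + ((c :: rest).length : Int) := by
      simp; ring
    rw [harith] at this
    simpa using this

-- ===== VERDICT (by name: the statement is the Claim_ definition above) =====
theorem solution_spec : Claim_equal_solution := by
  intro letters _
  unfold Spec_solution solution solution_alt
  have h0 : SolInv 0 PySem.Dict.empty PySem.Dict.empty
      PySem.Set.empty PySem.Set.empty PySem.Set.empty := by
    refine ⟨?_, ?_, ?_, ?_, ?_, ?_, ?_⟩ <;>
      simp [PySem.Dict.get?_empty, PySem.Set.empty, PySem.Dict.keys_empty]
  obtain ⟨hinv, hcount⟩ := solInv_loop letters.toList 0 le_rfl PySem.Dict.empty PySem.Dict.empty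
    0 PySem.Set.empty PySem.Set.empty PySem.Set.empty h0 (by simp [PySem.Set.empty])
  obtain ⟨hus, hcnd, hcs, hls, hLv, hUv, hLnd⟩ := hinv
  set A := (PySem.List.enumerate letters.toList 0).foldl solA_step
    (PySem.Dict.empty, PySem.Dict.empty) with hA
  set B := letters.toList.foldl solB_step
    (0, PySem.Set.empty, PySem.Set.empty, PySem.Set.empty) with hB
  rw [PySem.List.foldl_if_add_one
    (fun a => A.1.contains a && decide (A.2.getD a 0 < A.1.getD a 0)) A.2.keys 0, hcount]
  have hperm : (A.2.keys.filter
      (fun a => A.1.contains a && decide (A.2.getD a 0 < A.1.getD a 0))).Perm B.2.2.2 := by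
    rw [List.perm_ext_iff_of_nodup (hLnd.filter _) hcnd]
    intro a
    rw [List.mem_filter, hcs a]
    constructor
    · rintro ⟨hk, hp⟩
      simp only [Bool.and_eq_true, decide_eq_true_eq] at hp
      refine ⟨?_, ?_, hp.2⟩
      · rw [← PySem.Dict.contains_eq_isSome_get?]; exact hp.1
      · rw [Option.isSome_iff_ne_none]
        intro hnone
        exact ((PySem.Dict.get?_eq_none_iff_not_mem_keys A.2 a).mp hnone) hk
    · rintro ⟨h1, h2, h3⟩
      constructor
      · by_contra hk
        rw [← PySem.Dict.get?_eq_none_iff_not_mem_keys A.2 a] at hk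
        rw [hk] at h2; cases h2
      · simp only [Bool.and_eq_true, decide_eq_true_eq]
        exact ⟨by rw [PySem.Dict.contains_eq_isSome_get?]; exact h1, h3⟩
  rw [List.countP_eq_length_filter, hperm.length_eq]
  simp
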